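-- pv_equiv track=rewrite | github.com/clamsproject/consumer-evaluation | sr-eval/evaluate.py | closest_gold_timestamp
-- ===== SOURCE A (Python) =====
-- def closest_gold_timestamp(pred_stamp, gold_dict, good_range=5):
--     """
--     method to match a given predicted timestamp (key) with the closest gold timestamp:
--     acceptable range is default +/- 5 ms. if nothing matches, return None
--     """
--     if pred_stamp in gold_dict:
--         return pred_stamp
--     for i in range(good_range, 0, -1):
--         if pred_stamp - i in gold_dict:
--             return pred_stamp - i
--     for i in range(1, good_range + 1):
--         if pred_stamp + i in gold_dict:
--             return pred_stamp + i
--     return None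
-- ===== SOURCE B (Python) =====
-- def closest_gold_timestamp(pred_stamp, gold_dict, good_range=5):
--     """
--     method to match a given predicted timestamp (key) with the closest gold timestamp:
--     acceptable range is default +/- 5 ms. if nothing matches, return None
--     """
--     if pred_stamp in gold_dict:
--         return pred_stamp
--     in_range = [g for g in gold_dict if abs(g - pred_stamp) <= good_range]
--     return min(in_range) if in_range else None
-- ===== Notes on version B (the rewrite author's own statement) =====
-- stated objective: simpler
-- what changed: Instead of probing 2*good_range candidate offsets against the dict, B filters the dict keys to those within good_range of pred_stamp and returns their minimum (A's priority -- exact match, then furthest below, then nearest above -- is exactly the numerically smallest in-range key, with the exact match handled first).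
import Mathlib
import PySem

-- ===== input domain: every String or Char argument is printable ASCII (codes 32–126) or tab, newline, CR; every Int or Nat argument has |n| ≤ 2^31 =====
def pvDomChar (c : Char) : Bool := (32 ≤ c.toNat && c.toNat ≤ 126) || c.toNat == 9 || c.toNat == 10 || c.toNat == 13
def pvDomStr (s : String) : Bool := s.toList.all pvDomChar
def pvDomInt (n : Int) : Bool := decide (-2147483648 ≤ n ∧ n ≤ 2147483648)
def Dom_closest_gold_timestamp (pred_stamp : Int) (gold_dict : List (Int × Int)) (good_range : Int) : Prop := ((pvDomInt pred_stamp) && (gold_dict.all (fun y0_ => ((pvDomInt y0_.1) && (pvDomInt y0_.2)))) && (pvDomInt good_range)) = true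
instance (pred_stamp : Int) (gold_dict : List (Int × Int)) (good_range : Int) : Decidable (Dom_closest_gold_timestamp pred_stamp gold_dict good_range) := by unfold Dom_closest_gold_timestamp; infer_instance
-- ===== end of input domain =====

-- B replaces A's 2*good_range membership probes by a filter of the keys to the
-- in-range ones followed by min (A's scan order makes it return exactly the
-- smallest in-range key, exact match first): simpler, one pass over the dict.


-- ===== PORT A =====
-- 'x in gold_dict' = key membership in the dict
def cgtMemKey (gd : List (Int × Int)) (x : Int) : Bool := gd.any (fun kv => kv.1 == x)

-- 'for i in range(good_range, 0, -1): if pred - i in gold_dict: return pred - i'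
def cgtLow (pred : Int) (gd : List (Int × Int)) : List Int → Option Int
  | [] => none
  | i :: rest => if cgtMemKey gd (pred - i) then some (pred - i) else cgtLow pred gd rest

-- 'for i in range(1, good_range + 1): if pred + i in gold_dict: return pred + i'
def cgtHigh (pred : Int) (gd : List (Int × Int)) : List Int → Option Int
  | [] => none
  | i :: rest => if cgtMemKey gd (pred + i) then some (pred + i) else cgtHigh pred gd rest

def closest_gold_timestamp (pred_stamp : Int) (gold_dict : List (Int × Int)) (good_range : Int) : Option Int :=
  if cgtMemKey gold_dict pred_stamp then some pred_stamp
  else match cgtLow pred_stamp gold_dict (PySem.List.pyRange good_range 0 (-1)) with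
    | some r => some r
    | none => cgtHigh pred_stamp gold_dict (PySem.List.pyRange 1 (good_range + 1) 1)

-- ===== PORT B =====
def closest_gold_timestamp_alt (pred_stamp : Int) (gold_dict : List (Int × Int)) (good_range : Int) : Option Int :=
  if gold_dict.any (fun kv => kv.1 == pred_stamp) then some pred_stamp
  else
    let in_range := (gold_dict.map Prod.fst).filter (fun g => decide (|g - pred_stamp| ≤ good_range))
    PySem.List.min? in_range (fun g => g)

-- ===== PRECONDITION & SPEC =====
def Spec_closest_gold_timestamp (pred_stamp : Int) (gold_dict : List (Int × Int)) (good_range : Int) (out : Option Int) : Prop := out = closest_gold_timestamp_alt pred_stamp gold_dict good_range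
instance (pred_stamp : Int) (gold_dict : List (Int × Int)) (good_range : Int) (out : Option Int) : Decidable (Spec_closest_gold_timestamp pred_stamp gold_dict good_range out) := by unfold Spec_closest_gold_timestamp; infer_instance

-- ===== CLAIM (what is proved, stated in full; the proofs are below) =====
def Claim_equal_closest_gold_timestamp : Prop := ∀ (pred_stamp : Int) (gold_dict : List (Int × Int)) (good_range : Int), Dom_closest_gold_timestamp pred_stamp gold_dict good_range → Spec_closest_gold_timestamp pred_stamp gold_dict good_range (closest_gold_timestamp pred_stamp gold_dict good_range)

-- ===== LEMMAS AND PROOFS =====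

theorem cgtMemKey_iff (gd : List (Int × Int)) (x : Int) :
    cgtMemKey gd x = true ↔ x ∈ gd.map Prod.fst := by
  simp [cgtMemKey, List.any_eq_true, List.mem_map]

theorem cgtLow_eq_find (pred : Int) (gd : List (Int × Int)) (is : List Int) :
    cgtLow pred gd is = (is.map (fun i => pred - i)).find? (cgtMemKey gd) := by
  induction is with
  | nil => rfl
  | cons i rest ih =>
      simp only [cgtLow, List.map_cons, List.find?_cons]
      cases h : cgtMemKey gd (pred - i) <;> simp [ih]

theorem cgtHigh_eq_find (pred : Int) (gd : List (Int × Int)) (is : List Int) :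
    cgtHigh pred gd is = (is.map (fun i => pred + i)).find? (cgtMemKey gd) := by
  induction is with
  | nil => rfl
  | cons i rest ih =>
      simp only [cgtHigh, List.map_cons, List.find?_cons]
      cases h : cgtMemKey gd (pred + i) <;> simp [ih]

theorem cgt_map_low (pred gr : Int) :
    (PySem.List.pyRange gr 0 (-1)).map (fun i => pred - i) = PySem.List.pyRange (pred - gr) pred 1 := by
  rw [PySem.List.pyRange_neg_one, PySem.List.pyRange_one]
  simp only [List.map_map]
  have h1 : (gr - 0).toNat = (pred - (pred - gr)).toNat := by omega
  rw [h1]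
  apply List.map_congr_left
  intro k _
  simp only [Function.comp]
  omega

theorem cgt_map_high (pred gr : Int) :
    (PySem.List.pyRange 1 (gr + 1) 1).map (fun i => pred + i) = PySem.List.pyRange (pred + 1) (pred + gr + 1) 1 := by
  rw [PySem.List.pyRange_one, PySem.List.pyRange_one]
  simp only [List.map_map]
  have h1 : (gr + 1 - 1).toNat = (pred + gr + 1 - (pred + 1)).toNat := by omega
  rw [h1]
  apply List.map_congr_left
  intro k _
  simp only [Function.comp]
  omega

-- on an ascending list, find? returns a lower bound of all satisfying elements
theorem cgt_find_min {L : List Int} {p : Int → Bool} {v : Int}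
    (hs : L.Pairwise (· < ·)) (hf : L.find? p = some v) :
    ∀ x ∈ L, p x = true → v ≤ x := by
  induction L with
  | nil => simp at hf
  | cons a t ih =>
      rw [List.find?_cons] at hf
      rcases List.pairwise_cons.mp hs with ⟨ha, ht⟩
      cases hpa : p a with
      | true =>
          rw [hpa] at hf
          simp at hf
          subst hf
          intro x hx _
          rcases List.mem_cons.mp hx with rfl | hx
          · exact le_refl _
          · exact le_of_lt (ha x hx)
      | false =>
          rw [hpa] at hf
          simp at hf
          intro x hx hpx
          rcases List.mem_cons.mp hx with rfl | hx
          · rw [hpx] at hpa; cases hpa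
          · exact ih ht hf x hx hpx

-- ===== VERDICT (by name: the statement is the Claim_ definition above) =====
theorem closest_gold_timestamp_spec : Claim_equal_closest_gold_timestamp := by
  intro pred gd gr _
  unfold Spec_closest_gold_timestamp closest_gold_timestamp closest_gold_timestamp_alt
  by_cases hmem : cgtMemKey gd pred = true
  · have hmem' : (gd.any fun kv => kv.1 == pred) = true := hmem
    simp only [hmem, hmem', if_true]
  · have hmemf : cgtMemKey gd pred = false := by
      cases h : cgtMemKey gd pred
      · rfl
      · exact absurd h hmem
    have hmem' : (gd.any fun kv => kv.1 == pred) = false := hmemf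
    simp only [hmemf, hmem', Bool.false_eq_true, if_false]
    rw [cgtLow_eq_find, cgtHigh_eq_find, cgt_map_low, cgt_map_high]
    set K := gd.map Prod.fst with hK
    have hpredK : pred ∉ K := by
      intro h
      have := (cgtMemKey_iff gd pred).mpr h
      rw [this] at hmemf; cases hmemf
    set q : Int → Bool := fun g => decide (|g - pred| ≤ gr) with hq
    set S := K.filter q with hS
    by_cases hgr : gr ≤ 0
    · -- both probe ranges empty, and no key can be in range (pred itself is absent)
      have hL1 : PySem.List.pyRange (pred - gr) pred 1 = ([] : List Int) :=
        PySem.List.pyRange_one_eq_nil (by omega)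
      have hL2 : PySem.List.pyRange (pred + 1) (pred + gr + 1) 1 = ([] : List Int) :=
        PySem.List.pyRange_one_eq_nil (by omega)
      have hSnil : S = [] := by
        rw [hS]
        apply List.filter_eq_nil_iff.mpr
        intro g hg hqg
        rw [hq] at hqg
        simp only [decide_eq_true_eq, abs_le] at hqg
        have : g = pred := by omega
        exact hpredK (this ▸ hg)
      rw [hL1, hL2, hSnil]
      rfl
    · -- merge the two scans into one ascending scan over [pred-gr, pred+gr+1)
      have hmid : PySem.List.pyRange pred (pred + gr + 1) 1 = pred :: PySem.List.pyRange (pred + 1) (pred + gr + 1) 1 :=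
        PySem.List.pyRange_one_cons (by omega)
      have hsplit : PySem.List.pyRange (pred - gr) (pred + gr + 1) 1
          = PySem.List.pyRange (pred - gr) pred 1 ++ PySem.List.pyRange pred (pred + gr + 1) 1 :=
        PySem.List.pyRange_one_append _ _ _ (by omega) (by omega)
      have hfind : Option.or ((PySem.List.pyRange (pred - gr) pred 1).find? (cgtMemKey gd))
            ((PySem.List.pyRange (pred + 1) (pred + gr + 1) 1).find? (cgtMemKey gd))
            = (PySem.List.pyRange (pred - gr) (pred + gr + 1) 1).find? (cgtMemKey gd) := by
        rw [hsplit, hmid, List.find?_append, List.find?_cons, hmemf]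
      set L := PySem.List.pyRange (pred - gr) (pred + gr + 1) 1 with hL
      have hmemL : ∀ x : Int, x ∈ L ↔ q x = true := by
        intro x
        rw [hL, PySem.List.mem_pyRange_one, hq]
        simp only [decide_eq_true_eq, abs_le]
        omega
      have hLs : L.Pairwise (· < ·) := PySem.List.pairwise_lt_pyRange_one _ _
      have hgoal : L.find? (cgtMemKey gd) = PySem.List.min? S (fun g => g) := by
        cases hf : L.find? (cgtMemKey gd) with
        | none =>
            have hnone := List.find?_eq_none.mp hf
            have hSnil : S = [] := by
              rw [hS]
              apply List.filter_eq_nil_iff.mpr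
              intro g hg hqg
              exact hnone g ((hmemL g).mpr hqg) ((cgtMemKey_iff gd g).mpr hg)
            rw [hSnil]
            rfl
        | some v =>
            have hpv : cgtMemKey gd v = true := List.find?_some hf
            have hvL : v ∈ L := List.mem_of_find?_eq_some hf
            have hvS : v ∈ S := by
              rw [hS, List.mem_filter]
              exact ⟨(cgtMemKey_iff gd v).mp hpv, (hmemL v).mp hvL⟩
            cases hm : PySem.List.min? S (fun g => g) with
            | none =>
                have := (PySem.List.min?_eq_none_iff S (fun g => g)).mp hm
                rw [this] at hvS; cases hvS
            | some m =>
                have hmS : m ∈ S := PySem.List.min?_mem hm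
                have hmle : m ≤ v := PySem.List.min?_isMin hm v hvS
                have hvle : v ≤ m := by
                  rcases List.mem_filter.mp (hS ▸ hmS) with ⟨hmK, hqm⟩
                  exact cgt_find_min hLs hf m ((hmemL m).mpr hqm) ((cgtMemKey_iff gd m).mpr hmK)
                rw [le_antisymm hmle hvle]
      rw [← hgoal, ← hfind]
      cases hf1 : (PySem.List.pyRange (pred - gr) pred 1).find? (cgtMemKey gd) <;> simp [Option.or]
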